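-- pv_equiv track=rewrite | github.com/JeasonKim/yutto | yutto/processor/downloader.py | slice_blocks
-- ===== SOURCE A (Python) =====
-- def slice_blocks(start: int, total_size: int | None, block_size: int | None = None) -> list[tuple[int, int | None]]:
--     """生成分块后的 (start, size) 序列
--
--     ### Args
--
--     - start (int): 总起始位置
--     - total_size (Optional[int]): 需要分块的总大小
--     - block_size (Optional[int], optional): 每块的大小. Defaults to None.
--
--     ### Returns
--
--     - list[tuple[int, Optional[int]]]: 分块大小序列，使用元组组织，格式为 (start, size)
--     """
--     if total_size is None:
--         return [(0, None)]
--     if block_size is None: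
--         return [(0, total_size - 1)]
--     assert start <= total_size, f"起始地址（{start}）大于总地址（{total_size}）"
--     offset_list: list[tuple[int, int | None]] = [(i, block_size) for i in range(start, total_size, block_size)]
--     if (total_size - start) % block_size != 0:
--         offset_list[-1] = (
--             start + (total_size - start) // block_size * block_size,
--             total_size - start - (total_size - start) // block_size * block_size,
--         )
--     return offset_list
-- ===== SOURCE B (Python) =====
-- def slice_blocks(start: int, total_size: int | None, block_size: int | None = None) -> list[tuple[int, int | None]]:
--     if total_size is None:
--         return [(0, None)]
--     if block_size is None:
--         return [(0, total_size - 1)]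
--     assert start <= total_size, f"起始地址（{start}）大于总地址（{total_size}）"
--     # build the list back-to-front: peel the final (possibly short) block first
--     blocks: list[tuple[int, int | None]] = []
--     end = total_size
--     while end > start:
--         size = (end - start) % block_size or block_size
--         end -= size
--         blocks.append((end, size))
--     blocks.reverse()
--     return blocks
-- ===== Notes on version B (the rewrite author's own statement) =====
-- stated objective: alternative
-- what changed: B builds the block list back-to-front: a while loop peels the final (possibly short) block first with size = (end-start) % block_size or block_size, then reverses, instead of A's forward stride-range of uniform blocks with a patched last tuple
-- outside the precondition, e.g. on slice_blocks(0, 6, -3): A returns [], B does not finish within the time limit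
import Mathlib
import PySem

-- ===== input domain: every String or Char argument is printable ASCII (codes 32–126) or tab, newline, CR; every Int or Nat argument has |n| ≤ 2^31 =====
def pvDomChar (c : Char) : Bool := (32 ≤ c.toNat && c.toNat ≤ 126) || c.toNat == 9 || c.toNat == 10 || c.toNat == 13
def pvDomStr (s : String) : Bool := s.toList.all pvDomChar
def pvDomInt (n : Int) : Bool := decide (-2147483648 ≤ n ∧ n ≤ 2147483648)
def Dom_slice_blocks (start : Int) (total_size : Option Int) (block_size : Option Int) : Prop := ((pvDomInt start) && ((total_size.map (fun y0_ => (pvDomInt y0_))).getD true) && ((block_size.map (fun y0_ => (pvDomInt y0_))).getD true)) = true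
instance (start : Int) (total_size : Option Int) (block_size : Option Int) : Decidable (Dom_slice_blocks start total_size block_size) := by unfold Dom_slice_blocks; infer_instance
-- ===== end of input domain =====

-- B builds the block list back-to-front: it peels the final (possibly short) block first
-- via `(end-start) % block_size or block_size` and then reverses, instead of A's
-- stride-range of uniform blocks with a patched last tuple (objective: alternative).

-- ===== PORT A =====
def slice_blocks (start : Int) (total_size : Option Int) (block_size : Option Int) : List (Int × Option Int) :=
  match total_size with
  | none => [(0, none)]
  | some ts =>
    match block_size with
    | none => [(0, some (ts - 1))]
    | some bs =>
      -- assert start <= total_size : failing inputs are excluded by Pre_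
      let offset_list : List (Int × Option Int) :=
        (PySem.List.pyRange start ts bs).map (fun i => (i, some bs))
      if PySem.Int.mod (ts - start) bs ≠ 0 then
        -- offset_list[-1] = (…): last-element assignment; Python raises IndexError on [], excluded by Pre_
        offset_list.dropLast ++
          [(start + PySem.Int.floordiv (ts - start) bs * bs,
            some (ts - start - PySem.Int.floordiv (ts - start) bs * bs))]
      else
        offset_list

-- ===== PORT B =====
-- the while loop of Source B: peels the last block (end, size) and recurses on the new end;
-- the extra `0 < bs` conjunct in the guard only totalizes the recursion (Python's loop
-- does not terminate there; such inputs lie outside Pre_)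
def sliceRev (start bs e : Int) : List (Int × Option Int) :=
  if h : start < e ∧ 0 < bs then
    let r := PySem.Int.mod (e - start) bs
    let size := if r = 0 then bs else r
    (e - size, some size) :: sliceRev start bs (e - size)
  else []
termination_by (e - start).toNat
decreasing_by
  obtain ⟨hlt, hbs⟩ := h
  have hm : PySem.Int.mod (e - start) bs = (e - start) % bs := PySem.Int.mod_eq_emod_of_pos hbs
  have h1 : 0 ≤ (e - start) % bs := Int.emod_nonneg _ (by omega)
  have h2 : (e - start) % bs < bs := Int.emod_lt_of_pos _ hbs
  rw [hm]
  split_ifs with hr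
  · have hd : bs ∣ (e - start) := Int.dvd_of_emod_eq_zero hr
    have h8 : bs ≤ e - start := Int.le_of_dvd (by omega) hd
    omega
  · omega

def slice_blocks_alt (start : Int) (total_size : Option Int) (block_size : Option Int) : List (Int × Option Int) :=
  match total_size with
  | none => [(0, none)]
  | some ts =>
    match block_size with
    | none => [(0, some (ts - 1))]
    | some bs =>
      -- assert start <= total_size : failing inputs are excluded by Pre_
      (sliceRev start bs ts).reverse

-- ===== PRECONDITION & SPEC =====
-- Pre_ excludes the inputs where A raises (start > total_size → AssertionError;
-- block_size = 0 → ValueError from range; block_size < 0 with start < total_size and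
-- block_size not dividing total_size - start → IndexError on offset_list[-1]), and the
-- one corner where A still returns: block_size < 0 with start < total_size and
-- block_size dividing total_size - start, where A's [] is an accident of the empty
-- range and B's backward while loop does not terminate.
def Pre_slice_blocks (start : Int) (total_size : Option Int) (block_size : Option Int) : Prop :=
  match total_size, block_size with
  | some ts, some bs => start ≤ ts ∧ (0 < bs ∨ (bs < 0 ∧ ts ≤ start))
  | _, _ => True
instance (start : Int) (total_size : Option Int) (block_size : Option Int) : Decidable (Pre_slice_blocks start total_size block_size) := by unfold Pre_slice_blocks; rcases total_size with _|ts <;> rcases block_size with _|bs <;> infer_instance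
def pvWitness_slice_blocks : Int × Option Int × Option Int := (0, some 10, some 3)

def Spec_slice_blocks (start : Int) (total_size : Option Int) (block_size : Option Int) (out : List (Int × Option Int)) : Prop := out = slice_blocks_alt start total_size block_size
instance (start : Int) (total_size : Option Int) (block_size : Option Int) (out : List (Int × Option Int)) : Decidable (Spec_slice_blocks start total_size block_size out) := by unfold Spec_slice_blocks; infer_instance

-- ===== CLAIM (what is proved, stated in full; the proofs are below) =====
def Claim_equal_slice_blocks : Prop := ∀ (start : Int) (total_size : Option Int) (block_size : Option Int), Dom_slice_blocks start total_size block_size → Pre_slice_blocks start total_size block_size → Spec_slice_blocks start total_size block_size (slice_blocks start total_size block_size)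

-- ===== LEMMAS AND PROOFS =====

-- both programs, under 0 < bs, produce the list of (i, min bs (ts - i)) over the range
def pvMinMap (start ts bs : Int) : List (Int × Option Int) :=
  (PySem.List.pyRange start ts bs).map (fun i => (i, some (min bs (ts - i))))

lemma pyRange_pos_nil (a b bs : Int) (hbs : 0 < bs) (h : b ≤ a) :
    PySem.List.pyRange a b bs = [] := by
  rw [PySem.List.pyRange_of_pos a b hbs]
  simp [show ¬ a < b by omega]

lemma pyRange_pos_cons (a b bs : Int) (hbs : 0 < bs) (h : a < b) :
    PySem.List.pyRange a b bs = a :: PySem.List.pyRange (a + bs) b bs := by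
  rw [PySem.List.pyRange_of_pos a b hbs, PySem.List.pyRange_of_pos (a + bs) b hbs]
  have hq : (b - a + bs - 1) / bs = (b - a - 1) / bs + 1 := by
    rw [show b - a + bs - 1 = (b - a - 1) + 1 * bs by ring,
        Int.add_mul_ediv_right _ _ (by omega : bs ≠ 0)]
  by_cases h2 : a + bs < b
  · have hd2 : b - (a + bs) + bs - 1 = b - a - 1 := by ring
    simp only [if_pos h, if_pos h2, hq, hd2]
    have hnn : 0 ≤ (b - a - 1) / bs := Int.ediv_nonneg (by omega) (by omega)
    rw [show ((b - a - 1) / bs + 1).toNat = ((b - a - 1) / bs).toNat + 1 by omega,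
        List.range_succ_eq_map]
    simp [List.map_map, Function.comp]
    intro k _; ring
  · have hz : (b - a - 1) / bs = 0 := Int.ediv_eq_zero_of_lt (by omega) (by omega)
    simp only [if_pos h, if_neg h2, hq, hz]
    simp

lemma pyRange_snoc (a e' size bs : Int) (hbs : 0 < bs) (ha : a ≤ e')
    (hdvd : bs ∣ (e' - a)) (hs1 : 0 < size) (hs2 : size ≤ bs) :
    PySem.List.pyRange a (e' + size) bs = PySem.List.pyRange a e' bs ++ [e'] := by
  obtain ⟨q, hq⟩ := hdvd
  have hq0 : 0 ≤ q := by nlinarith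
  rw [PySem.List.pyRange_of_pos a (e' + size) hbs, PySem.List.pyRange_of_pos a e' hbs]
  have hlt : a < e' + size := by omega
  have hn1 : (e' + size - a + bs - 1) / bs = q + 1 := by
    rw [show e' + size - a + bs - 1 = (size - 1) + (q + 1) * bs by linear_combination hq,
        Int.add_mul_ediv_right _ _ (by omega : bs ≠ 0),
        Int.ediv_eq_zero_of_lt (by omega) (by omega)]
    omega
  by_cases h2 : a < e'
  · have hq1 : 1 ≤ q := by nlinarith
    have hn2 : (e' - a + bs - 1) / bs = q := by
      rw [show e' - a + bs - 1 = (bs - 1) + q * bs by linear_combination hq,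
          Int.add_mul_ediv_right _ _ (by omega : bs ≠ 0),
          Int.ediv_eq_zero_of_lt (by omega) (by omega)]
      omega
    simp only [if_pos hlt, if_pos h2, hn1, hn2]
    rw [show (q + 1).toNat = q.toNat + 1 by omega, List.range_succ]
    simp
    rw [max_eq_left hq0]
    linarith [hq]
  · have hq0' : q = 0 := by nlinarith
    have hae : a = e' := by omega
    simp only [if_pos hlt, if_neg h2, hn1, hq0']
    simp [List.range_one, hae]

lemma sliceRev_reverse (bs : Int) (hbs : 0 < bs) :
    ∀ (n : Nat) (start e : Int), (e - start).toNat ≤ n → start ≤ e →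
      (sliceRev start bs e).reverse = pvMinMap start e bs := by
  intro n
  induction n with
  | zero =>
    intro start e hn he
    have : e = start := by omega
    subst this
    rw [sliceRev, dif_neg (by omega)]
    simp [pvMinMap, pyRange_pos_nil e e bs hbs le_rfl]
  | succ n ih =>
    intro start e hn he
    by_cases hlt : start < e
    · have hm : PySem.Int.mod (e - start) bs = (e - start) % bs :=
        PySem.Int.mod_eq_emod_of_pos hbs
      have h1 : 0 ≤ (e - start) % bs := Int.emod_nonneg _ (by omega)
      have h2 : (e - start) % bs < bs := Int.emod_lt_of_pos _ hbs
      have h5 := Int.emod_add_mul_ediv (e - start) bs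
      have h6 : 0 ≤ (e - start) / bs := Int.ediv_nonneg (by omega) (by omega)
      have h7 : 0 ≤ bs * ((e - start) / bs) := mul_nonneg (by omega) h6
      have hdvdr : bs ∣ (e - start) - (e - start) % bs :=
        ⟨(e - start) / bs, by omega⟩
      have hs1 : 0 < (if PySem.Int.mod (e - start) bs = 0 then bs else PySem.Int.mod (e - start) bs) := by
        split_ifs with h
        · exact hbs
        · rw [hm] at h ⊢; omega
      have hs2 : (if PySem.Int.mod (e - start) bs = 0 then bs else PySem.Int.mod (e - start) bs) ≤ bs := by
        split_ifs with h
        · exact le_rfl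
        · rw [hm]; omega
      have hsle : (if PySem.Int.mod (e - start) bs = 0 then bs else PySem.Int.mod (e - start) bs) ≤ e - start := by
        split_ifs with h
        · have hd : bs ∣ (e - start) := (PySem.Int.mod_eq_zero_iff_dvd _ _).mp h
          exact Int.le_of_dvd (by omega) hd
        · rw [hm]; omega
      have hdvd : bs ∣ (e - (if PySem.Int.mod (e - start) bs = 0 then bs else PySem.Int.mod (e - start) bs)) - start := by
        split_ifs with h
        · have hd : bs ∣ (e - start) := (PySem.Int.mod_eq_zero_iff_dvd _ _).mp h
          rw [show e - bs - start = (e - start) - bs by ring]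
          exact dvd_sub hd dvd_rfl
        · rw [hm, show e - (e - start) % bs - start = (e - start) - (e - start) % bs by ring]
          exact hdvdr
      set size : Int := if PySem.Int.mod (e - start) bs = 0 then bs else PySem.Int.mod (e - start) bs with hsdef
      rw [sliceRev, dif_pos ⟨hlt, hbs⟩]
      simp only [← hsdef, List.reverse_cons]
      rw [ih start (e - size) (by omega) (by omega)]
      have hsplit : PySem.List.pyRange start e bs
          = PySem.List.pyRange start (e - size) bs ++ [e - size] := by
        have := pyRange_snoc start (e - size) size bs hbs (by omega) hdvd hs1 hs2
        rw [show e - size + size = e by ring] at this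
        exact this
      unfold pvMinMap
      rw [hsplit, List.map_append]
      congr 1
      · apply List.map_congr_left
        intro i hi
        rw [PySem.List.mem_pyRange_iff_of_pos hbs] at hi
        obtain ⟨hi1, hi2, hi3⟩ := hi
        have hd4 : bs ∣ (e - size) - i := by
          have := dvd_sub hdvd hi3
          rw [show e - size - start - (i - start) = e - size - i by ring] at this
          exact this
        have hge : bs ≤ (e - size) - i := Int.le_of_dvd (by omega) hd4
        simp only [Prod.mk.injEq, true_and, Option.some.injEq]
        rw [min_eq_left (by omega), min_eq_left (by omega)]
      · simp only [List.map_cons, List.map_nil]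
        rw [show e - (e - size) = size by ring, min_eq_right hs2]
    · have : e = start := by omega
      subst this
      rw [sliceRev, dif_neg (by omega)]
      simp [pvMinMap, pyRange_pos_nil e e bs hbs le_rfl]

lemma blocks_eq (ts bs : Int) (hbs : 0 < bs) (n : Nat) :
    ∀ start : Int, (ts - start).toNat ≤ n → start ≤ ts →
      slice_blocks start (some ts) (some bs) = pvMinMap start ts bs := by
  induction n with
  | zero =>
    intro start hn hle
    have h : start = ts := by omega
    subst h
    simp only [slice_blocks, pvMinMap, pyRange_pos_nil start start bs hbs le_rfl,
      List.map_nil, sub_self]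
    have : PySem.Int.mod 0 bs = 0 := (PySem.Int.mod_eq_zero_iff_dvd 0 bs).mpr (dvd_zero bs)
    simp [this]
  | succ n ih =>
    intro start hn hle
    by_cases heq : start = ts
    · subst heq
      simp only [slice_blocks, pvMinMap, pyRange_pos_nil start start bs hbs le_rfl,
        List.map_nil, sub_self]
      have : PySem.Int.mod 0 bs = 0 := (PySem.Int.mod_eq_zero_iff_dvd 0 bs).mpr (dvd_zero bs)
      simp [this]
    · have hlt : start < ts := lt_of_le_of_ne hle heq
      by_cases h2 : ts ≤ start + bs
      · simp only [slice_blocks, pvMinMap, pyRange_pos_cons start ts bs hbs hlt,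
          pyRange_pos_nil (start + bs) ts bs hbs h2, List.map_cons, List.map_nil,
          PySem.Int.mod_eq_emod_of_pos hbs, PySem.Int.floordiv_eq_ediv_of_pos hbs]
        by_cases h3 : ts - start = bs
        · have : (ts - start) % bs = 0 := by rw [h3]; simp
          simp [h3.symm]
        · have hsmall : ts - start < bs := by omega
          have hm : (ts - start) % bs = ts - start := Int.emod_eq_of_lt (by omega) hsmall
          have hd : (ts - start) / bs = 0 := Int.ediv_eq_zero_of_lt (by omega) hsmall
          simp [hm, hd, show ts - start ≠ 0 by omega, min_eq_right (le_of_lt hsmall)]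
      · replace h2 : start + bs < ts := by omega
        have hmin : min bs (ts - start) = bs := min_eq_left (by omega)
        have hmodstep : PySem.Int.mod (ts - start) bs = PySem.Int.mod (ts - (start + bs)) bs := by
          rw [PySem.Int.mod_eq_emod_of_pos hbs, PySem.Int.mod_eq_emod_of_pos hbs]
          conv_lhs => rw [show ts - start = (ts - (start + bs)) + bs * 1 by ring]
          rw [Int.add_mul_emod_self_left]
        have hdivstep : PySem.Int.floordiv (ts - start) bs
            = PySem.Int.floordiv (ts - (start + bs)) bs + 1 := by
          rw [PySem.Int.floordiv_eq_ediv_of_pos hbs, PySem.Int.floordiv_eq_ediv_of_pos hbs,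
            show ts - start = (ts - (start + bs)) + 1 * bs by ring,
            Int.add_mul_ediv_right _ _ (by omega : bs ≠ 0)]
        have hpatch : (start + PySem.Int.floordiv (ts - start) bs * bs,
              some (ts - start - PySem.Int.floordiv (ts - start) bs * bs))
            = ((start + bs) + PySem.Int.floordiv (ts - (start + bs)) bs * bs,
              (some (ts - (start + bs) - PySem.Int.floordiv (ts - (start + bs)) bs * bs)
                : Option Int)) := by
          simp only [Prod.mk.injEq, Option.some.injEq, hdivstep]
          constructor <;> ring
        have ihs := ih (start + bs) (by omega) (by omega)
        simp only [slice_blocks, pvMinMap] at ihs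
        have hne : (PySem.List.pyRange (start + bs) ts bs).map
            (fun i => ((i : Int), (some bs : Option Int))) ≠ [] := by
          rw [pyRange_pos_cons (start + bs) ts bs hbs h2]; simp
        simp only [slice_blocks, pvMinMap, pyRange_pos_cons start ts bs hbs hlt,
          List.map_cons, hmodstep, hmin, hpatch]
        by_cases h4 : PySem.Int.mod (ts - (start + bs)) bs = 0
        · rw [if_neg (by simpa using h4)] at ihs ⊢
          rw [ihs]
        · rw [if_pos (by simpa using h4)] at ihs ⊢
          rw [List.dropLast_cons_of_ne_nil hne, List.cons_append, ihs]

lemma pyRange_nonpos_nil (a b bs : Int) (hbs : bs ≤ 0) (h : a ≤ b) :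
    PySem.List.pyRange a b bs = [] := by
  simp [PySem.List.pyRange, show ¬ 0 < bs by omega, show ¬ b < a by omega]

-- ===== VERDICT (by name: the statement is the Claim_ definition above) =====
theorem slice_blocks_spec : Claim_equal_slice_blocks := by
  intro start total_size block_size _ hpre
  unfold Spec_slice_blocks
  cases total_size with
  | none => rfl
  | some ts =>
    cases block_size with
    | none => rfl
    | some bs =>
      obtain ⟨hle, hcase⟩ := hpre
      rcases hcase with hpos | ⟨hneg, hge⟩
      · have hA := blocks_eq ts bs hpos (ts - start).toNat start le_rfl hle
        have hB := sliceRev_reverse bs hpos (ts - start).toNat start ts le_rfl hle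
        simp only [slice_blocks_alt]
        rw [hB, ← hA]
      · have hts : ts = start := by omega
        subst hts
        simp only [slice_blocks, slice_blocks_alt,
          pyRange_nonpos_nil ts ts bs (le_of_lt hneg) le_rfl, List.map_nil]
        rw [sliceRev, dif_neg (by omega)]
        simp [show PySem.Int.mod 0 bs = 0 from
          (PySem.Int.mod_eq_zero_iff_dvd 0 bs).mpr (dvd_zero bs)]
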